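-- pv_equiv track=rewrite | github.com/zeroincombenze/tools | travis_emulator/travis_emulator/make_travis_conf.py | comment_line
-- ===== SOURCE A (Python) =====
-- def comment_line(line):
--     line_out = ""
--     while line.startswith(" "):
--         line_out += " "
--         line = line[1:]
--     line_out += "# "
--     line_out += line
--     return line_out
-- ===== SOURCE B (Python) =====
-- def comment_line(line):
--     indent = len(line) - len(line.lstrip(' '))
--     return line[:indent] + '# ' + line[indent:]
-- ===== Notes on version B (the rewrite author's own statement) =====
-- stated objective: simpler
-- what changed: Replaces the character-by-character while loop that rebuilds the string in an accumulator with a single lstrip call (restricted to the space character) to find the indentation width, plus two slices.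
import Mathlib
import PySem

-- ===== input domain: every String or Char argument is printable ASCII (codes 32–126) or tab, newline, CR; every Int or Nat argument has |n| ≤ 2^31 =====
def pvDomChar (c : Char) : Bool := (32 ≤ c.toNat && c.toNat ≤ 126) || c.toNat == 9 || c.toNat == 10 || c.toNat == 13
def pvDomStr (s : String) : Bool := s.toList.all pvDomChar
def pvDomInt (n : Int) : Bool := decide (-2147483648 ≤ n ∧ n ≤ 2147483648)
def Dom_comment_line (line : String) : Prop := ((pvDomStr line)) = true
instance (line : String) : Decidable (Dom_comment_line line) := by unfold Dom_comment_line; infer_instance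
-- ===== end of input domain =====

-- B replaces A's per-character accumulation loop with one lstrip(' ') to find the indent width and two slices (objective: simpler).

-- ===== PORT A =====
-- the while loop: line_out accumulates one space per stripped leading space, then "# " and the rest
def commentLoopA (out : List Char) : List Char → List Char
  | [] => out ++ ['#', ' ']
  | c :: rest =>
      if c = ' ' then commentLoopA (out ++ [' ']) rest
      else out ++ ('#' :: ' ' :: c :: rest)

def comment_line (line : String) : String := String.ofList (commentLoopA [] line.toList)

-- ===== PORT B =====
def comment_line_alt (line : String) : String :=
  let cs := line.toList
  -- indent = len(line) - len(line.lstrip(' ')); lstrip(' ') drops exactly the leading ' ' characters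
  let indent := cs.length - (cs.dropWhile (· = ' ')).length
  String.ofList (cs.take indent ++ ('#' :: ' ' :: cs.drop indent))

-- ===== PRECONDITION & SPEC =====
def Spec_comment_line (line : String) (out : String) : Prop := out = comment_line_alt line
instance (line : String) (out : String) : Decidable (Spec_comment_line line out) := by unfold Spec_comment_line; infer_instance

-- ===== CLAIM (what is proved, stated in full; the proofs are below) =====
def Claim_equal_comment_line : Prop := ∀ (line : String), Dom_comment_line line → Spec_comment_line line (comment_line line)

-- ===== LEMMAS AND PROOFS =====

theorem commentLoopA_eq (cs : List Char) : ∀ out : List Char,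
    commentLoopA out cs = out ++ cs.takeWhile (· = ' ') ++ '#' :: ' ' :: cs.dropWhile (· = ' ') := by
  induction cs with
  | nil => intro out; simp [commentLoopA]
  | cons c rest ih =>
      intro out
      by_cases h : c = ' ' <;> simp [commentLoopA, h, ih]

-- ===== VERDICT (by name: the statement is the Claim_ definition above) =====
theorem comment_line_spec : Claim_equal_comment_line := by
  intro line _
  unfold Spec_comment_line comment_line comment_line_alt
  rw [commentLoopA_eq]
  set cs := line.toList
  have hsplit : cs.takeWhile (· = ' ') ++ cs.dropWhile (· = ' ') = cs :=
    List.takeWhile_append_dropWhile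
  have hlen : cs.length - (cs.dropWhile (· = ' ')).length = (cs.takeWhile (· = ' ')).length := by
    have := congrArg List.length hsplit
    rw [List.length_append] at this
    omega
  have htake : cs.take ((cs.takeWhile (· = ' ')).length) = cs.takeWhile (· = ' ') := by
    have h := List.take_left (l₁ := cs.takeWhile (· = ' ')) (l₂ := cs.dropWhile (· = ' '))
    rwa [hsplit] at h
  have hdrop : cs.drop ((cs.takeWhile (· = ' ')).length) = cs.dropWhile (· = ' ') := by
    have h := List.drop_left (l₁ := cs.takeWhile (· = ' ')) (l₂ := cs.dropWhile (· = ' '))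
    rwa [hsplit] at h
  simp [hlen, htake, hdrop]
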